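-- pv_equiv track=rewrite | github.com/lago-morph/ai-k8s | mk8/integrations/kubeconfig.py | _resolve_naming_conflict
-- ===== SOURCE A (Python) =====
-- from typing import Dict, Any, Optional, List
--
-- def _resolve_naming_conflict(
--     desired_name: str, existing_names: List[str]
-- ) -> str:
--     """
--     Resolve naming conflicts by appending numeric suffix.
--
--     Args:
--         desired_name: Desired cluster name
--         existing_names: List of existing cluster names
--
--     Returns:
--         Unique cluster name
--     """
--     if desired_name not in existing_names:
--         return desired_name
--
--     # Find next available suffix
--     suffix = 2
--     while f"{desired_name}-{suffix}" in existing_names: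
--         suffix += 1
--
--     return f"{desired_name}-{suffix}"
-- ===== SOURCE B (Python) =====
-- def _resolve_naming_conflict(desired_name, existing_names):
--     if desired_name not in existing_names:
--         return desired_name
--     prefix = desired_name + "-"
--     used = {n[len(prefix):] for n in existing_names if n.startswith(prefix)}
--     k = min(k for k in range(2, len(used) + 3) if str(k) not in used)
--     return f"{desired_name}-{k}"
-- ===== Notes on version B (the rewrite author's own statement) =====
-- stated objective: alternative
-- what changed: Instead of probing formatted candidate names against the list one suffix at a time, B makes one pass over existing_names harvesting the suffix strings that follow 'desired_name-' into a set, then returns the smallest suffix >= 2 whose decimal form is absent, taken from a pigeonhole range of size |set|+1.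
import Mathlib
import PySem

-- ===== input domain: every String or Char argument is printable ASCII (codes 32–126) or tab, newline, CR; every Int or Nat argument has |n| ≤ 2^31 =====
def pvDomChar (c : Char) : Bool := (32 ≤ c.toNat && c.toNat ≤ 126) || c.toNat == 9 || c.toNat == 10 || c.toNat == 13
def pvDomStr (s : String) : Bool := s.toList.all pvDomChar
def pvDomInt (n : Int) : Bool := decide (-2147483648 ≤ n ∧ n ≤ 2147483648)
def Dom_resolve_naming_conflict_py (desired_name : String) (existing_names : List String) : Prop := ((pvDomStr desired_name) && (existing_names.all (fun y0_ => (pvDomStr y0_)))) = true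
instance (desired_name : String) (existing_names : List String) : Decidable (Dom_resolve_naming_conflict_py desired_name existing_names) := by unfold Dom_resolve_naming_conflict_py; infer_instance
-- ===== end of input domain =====

-- B replaces A's one-by-one probing of formatted candidate names with a one-pass harvest of the
-- suffix strings already present, then picks the smallest free suffix ≥ 2 from a pigeonhole range.

-- ===== PORT A =====
-- 'while f"{desired_name}-{suffix}" in existing_names: suffix += 1' — the loop can take at most
-- existing_names.length steps (each step needs a member of the list), so fuel length+1 suffices.
def pvLoopA (desired_name : String) (existing_names : List String) : Nat → Int → String
  | 0, suffix => desired_name ++ "-" ++ PySem.Int.toStr suffix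
  | fuel+1, suffix =>
    if (desired_name ++ "-" ++ PySem.Int.toStr suffix) ∈ existing_names then
      pvLoopA desired_name existing_names fuel (suffix + 1)
    else
      desired_name ++ "-" ++ PySem.Int.toStr suffix

def resolve_naming_conflict_py (desired_name : String) (existing_names : List String) : String :=
  if desired_name ∉ existing_names then desired_name
  else pvLoopA desired_name existing_names (existing_names.length + 1) 2

-- ===== PORT B =====
-- n[len(prefix):]
def pvRest (pfx n : String) : String :=
  String.ofList (PySem.List.slice n.toList (some (PySem.Str.len pfx)) none)

-- {n[len(prefix):] for n in existing_names if n.startswith(prefix)}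
def pvUsed (desired_name : String) (existing_names : List String) : PySem.Set String :=
  PySem.Set.ofList
    ((existing_names.filter (fun n => PySem.Str.startswith n (desired_name ++ "-"))).map
      (fun n => pvRest (desired_name ++ "-") n))

def resolve_naming_conflict_py_alt (desired_name : String) (existing_names : List String) : String :=
  if desired_name ∉ existing_names then desired_name
  else
    let used := pvUsed desired_name existing_names
    match PySem.List.min?
        ((PySem.List.pyRange 2 (used.length + 3) 1).filter
          (fun k => !(PySem.Set.contains used (PySem.Int.toStr k)))) (fun x => x) with
    | some k => desired_name ++ "-" ++ PySem.Int.toStr k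
    | none => desired_name  -- unreachable by pigeonhole (Python's min is over a nonempty generator)

-- ===== PRECONDITION & SPEC =====
def Spec_resolve_naming_conflict_py (desired_name : String) (existing_names : List String) (out : String) : Prop := out = resolve_naming_conflict_py_alt desired_name existing_names
instance (desired_name : String) (existing_names : List String) (out : String) : Decidable (Spec_resolve_naming_conflict_py desired_name existing_names out) := by unfold Spec_resolve_naming_conflict_py; infer_instance

-- ===== CLAIM (what is proved, stated in full; the proofs are below) =====
def Claim_equal_resolve_naming_conflict_py : Prop := ∀ (desired_name : String) (existing_names : List String), Dom_resolve_naming_conflict_py desired_name existing_names → Spec_resolve_naming_conflict_py desired_name existing_names (resolve_naming_conflict_py desired_name existing_names)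

-- ===== LEMMAS AND PROOFS =====

-- §1 Injectivity of str-formatting (Nat.toDigits 10) on the naturals.

theorem pvCore_succ (f n : Nat) (ds : List Char) :
    Nat.toDigitsCore 10 (f+1) n ds =
      if n / 10 = 0 then (n % 10).digitChar :: ds
      else Nat.toDigitsCore 10 f (n / 10) ((n % 10).digitChar :: ds) := rfl

theorem pvCore_append : ∀ (f n : Nat) (ds : List Char),
    Nat.toDigitsCore 10 f n ds = Nat.toDigitsCore 10 f n [] ++ ds := by
  intro f
  induction f with
  | zero => intro n ds; simp [Nat.toDigitsCore]
  | succ f ih =>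
    intro n ds
    rw [pvCore_succ, pvCore_succ]
    by_cases h : n / 10 = 0
    · simp [h]
    · simp only [h, if_false]
      rw [ih (n / 10) ((n % 10).digitChar :: ds), ih (n / 10) [(n % 10).digitChar]]
      simp

theorem pvCore_fuel : ∀ (f g n : Nat) (ds : List Char), n < 10 ^ (f + 1) → n < 10 ^ (g + 1) →
    Nat.toDigitsCore 10 (f + 1) n ds = Nat.toDigitsCore 10 (g + 1) n ds := by
  intro f
  induction f with
  | zero =>
    intro g n ds hf hg
    have h0 : n / 10 = 0 := by omega
    rw [pvCore_succ 0 n ds, pvCore_succ g n ds, if_pos h0, if_pos h0]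
  | succ f ih =>
    intro g n ds hf hg
    by_cases h0 : n / 10 = 0
    · rw [pvCore_succ (f + 1) n ds, pvCore_succ g n ds, if_pos h0, if_pos h0]
    · have h10 : 10 ≤ n := by omega
      cases g with
      | zero => simp at hg; omega
      | succ g =>
        rw [pvCore_succ (f + 1) n ds, pvCore_succ (g + 1) n ds, if_neg h0, if_neg h0]
        exact ih g (n / 10) _ (by omega) (by omega)

theorem pvToDigits_small (n : Nat) (h : n < 10) : Nat.toDigits 10 n = [Nat.digitChar n] := by
  have h0 : n / 10 = 0 := by omega
  have hm : n % 10 = n := by omega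
  show Nat.toDigitsCore 10 (n + 1) n [] = _
  rw [pvCore_succ, if_pos h0, hm]

theorem pvToDigits_step (n : Nat) (h : 10 ≤ n) :
    Nat.toDigits 10 n = Nat.toDigits 10 (n / 10) ++ [Nat.digitChar (n % 10)] := by
  have h0 : n / 10 ≠ 0 := by omega
  obtain ⟨m, rfl⟩ : ∃ m, n = m + 1 := ⟨n - 1, by omega⟩
  show Nat.toDigitsCore 10 (m + 1 + 1) (m + 1) [] = _
  rw [pvCore_succ, if_neg h0]
  rw [pvCore_append (m + 1) ((m + 1) / 10) [((m + 1) % 10).digitChar]]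
  show Nat.toDigitsCore 10 (m + 1) ((m + 1) / 10) [] ++ _
      = Nat.toDigitsCore 10 ((m + 1) / 10 + 1) ((m + 1) / 10) [] ++ _
  cases m with
  | zero => omega
  | succ m' =>
    rw [pvCore_fuel (m' + 1) ((m' + 1 + 1) / 10) ((m' + 1 + 1) / 10) []
        (by
          have h2 : m' + 1 + 1 < 10 ^ (m' + 1 + 1) := Nat.lt_pow_self (by norm_num)
          omega)
        (by
          have h2 : (m' + 1 + 1) / 10 < 10 ^ ((m' + 1 + 1) / 10) := Nat.lt_pow_self (by norm_num)
          have h3 : (10:Nat) ^ ((m' + 1 + 1) / 10) ≤ 10 ^ ((m' + 1 + 1) / 10 + 1) :=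
            Nat.pow_le_pow_right (by norm_num) (by omega)
          have h4 : (m' + 2) / 10 < 10 ^ ((m' + 2) / 10) := Nat.lt_pow_self (by norm_num)
          have h5 : (10:Nat) ^ ((m' + 2) / 10) <= 10 ^ ((m' + 2) / 10 + 1) :=
            Nat.pow_le_pow_right (by norm_num) (by omega)
          omega)]

theorem pvDigitChar_toNat (d : Nat) (h : d < 10) : (Nat.digitChar d).toNat = 48 + d := by
  interval_cases d <;> decide

theorem pvDec_go (n : Nat) : ∀ (a : Nat),
    (Nat.toDigits 10 n).foldl (fun a c => 10 * a + (c.toNat - 48)) a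
      = a * 10 ^ (Nat.toDigits 10 n).length + n := by
  induction n using Nat.strong_induction_on with
  | _ n ih =>
    intro a
    by_cases h : n < 10
    · rw [pvToDigits_small n h]
      simp [List.foldl, pvDigitChar_toNat n h]
      omega
    · rw [pvToDigits_step n (by omega)]
      rw [List.foldl_append]
      rw [ih (n / 10) (by omega) a]
      simp only [List.foldl, List.length_append, List.length_cons, List.length_nil]
      rw [pvDigitChar_toNat (n % 10) (by omega)]
      have hpow : (10:Nat) ^ ((Nat.toDigits 10 (n / 10)).length + (0 + 1))
          = 10 ^ (Nat.toDigits 10 (n / 10)).length * 10 := by ring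
      rw [hpow]
      generalize (10:Nat) ^ (Nat.toDigits 10 (n / 10)).length = P
      have hmul : a * (P * 10) = 10 * (a * P) := by ring
      omega

theorem pvToDigits_inj (n m : Nat) (h : Nat.toDigits 10 n = Nat.toDigits 10 m) : n = m := by
  have hn := pvDec_go n 0
  have hm := pvDec_go m 0
  rw [h] at hn
  simp at hn hm
  omega

theorem pvToStr_inj (x y : Int) (hx : 0 ≤ x) (hy : 0 ≤ y)
    (h : PySem.Int.toStr x = PySem.Int.toStr y) : x = y := by
  have h' : PySem.Int.toChars x = PySem.Int.toChars y := by
    rw [← PySem.Int.toList_toStr, ← PySem.Int.toList_toStr, h]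
  simp only [PySem.Int.toChars, if_neg (not_lt.mpr hx), if_neg (not_lt.mpr hy)] at h'
  have := pvToDigits_inj _ _ h'
  omega

-- §2 The harvested set: toStr k ∈ pvUsed d ex ↔ the formatted name is in ex.

theorem pvRest_append (p s : String) : pvRest p (p ++ s) = s := by
  unfold pvRest
  rw [PySem.Str.len_eq, PySem.List.slice_from_natCast, String.toList_append,
    List.drop_left, String.ofList_toList]

theorem pvStartswith_append (p s : String) : PySem.Str.startswith (p ++ s) p = true := by
  rw [PySem.Str.startswith_eq, PySem.Chars.startswith_iff, String.toList_append]
  exact List.prefix_append _ _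

theorem pvOfStartswith (p n : String) (h : PySem.Str.startswith n p = true) :
    n = p ++ pvRest p n := by
  rw [PySem.Str.startswith_eq, PySem.Chars.startswith_iff] at h
  obtain ⟨t, ht⟩ := h
  unfold pvRest
  rw [PySem.Str.len_eq, PySem.List.slice_from_natCast, ← ht, List.drop_left]
  apply String.toList_inj.mp
  rw [String.toList_append, String.toList_ofList, ht]

theorem pvMem_used (d : String) (ex : List String) (k : String) :
    k ∈ pvUsed d ex ↔ (d ++ "-" ++ k) ∈ ex := by
  unfold pvUsed
  rw [PySem.Set.mem_ofList, List.mem_map]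
  constructor
  · rintro ⟨n, hn, rfl⟩
    rw [List.mem_filter] at hn
    have := pvOfStartswith (d ++ "-") n hn.2
    rw [← this]
    exact hn.1
  · intro h
    refine ⟨d ++ "-" ++ k, ?_, pvRest_append _ _⟩
    rw [List.mem_filter]
    exact ⟨h, pvStartswith_append _ _⟩

-- §3 Pigeonhole: in any stretch of S.length+1 consecutive suffixes one is free.

theorem pvNodup_length_le (l₁ l₂ : List String) (h : l₁.Nodup) (hs : l₁ ⊆ l₂) :
    l₁.length ≤ l₂.length := by
  classical
  calc l₁.length = l₁.toFinset.card := (List.toFinset_card_of_nodup h).symm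
    _ ≤ l₂.toFinset.card := Finset.card_le_card (fun x hx => by
        simp only [List.mem_toFinset] at *; exact hs hx)
    _ ≤ l₂.length := l₂.toFinset_card_le

theorem pvPigeon (S : List String) (hnd : S.Nodup) (lo : Int) (f : Int → String)
    (hinj : ∀ x y, lo ≤ x → lo ≤ y → f x = f y → x = y) :
    ∃ j : Int, lo ≤ j ∧ j < lo + S.length + 1 ∧ f j ∉ S := by
  by_contra hc
  push_neg at hc
  have hsub : (PySem.List.pyRange lo (lo + S.length + 1) 1).map f ⊆ S := by
    intro x hx
    rw [List.mem_map] at hx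
    obtain ⟨j, hj, rfl⟩ := hx
    rw [PySem.List.mem_pyRange_one] at hj
    exact hc j hj.1 hj.2
  have hnodup : ((PySem.List.pyRange lo (lo + S.length + 1) 1).map f).Nodup := by
    refine (PySem.List.nodup_pyRange_one (a := lo) (b := lo + S.length + 1)).map_on ?_
    intro x hx y hy hxy
    rw [PySem.List.mem_pyRange_one] at hx hy
    exact hinj x y hx.1 hy.1 hxy
  have hlen : ((PySem.List.pyRange lo (lo + S.length + 1) 1).map f).length = S.length + 1 := by
    rw [List.length_map, PySem.List.length_pyRange_one]
    omega
  have := pvNodup_length_le _ _ hnodup hsub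
  omega

-- §4 Characterizations of the two computations in the conflict branch.

theorem pvLoopA_char (d : String) (ex : List String) : ∀ (f : Nat) (s : Int),
    (∃ j : Int, s ≤ j ∧ j ≤ s + f ∧ (d ++ "-" ++ PySem.Int.toStr j) ∉ ex) →
    ∃ j : Int, s ≤ j ∧ (d ++ "-" ++ PySem.Int.toStr j) ∉ ex ∧
      (∀ i : Int, s ≤ i → i < j → (d ++ "-" ++ PySem.Int.toStr i) ∈ ex) ∧
      pvLoopA d ex f s = d ++ "-" ++ PySem.Int.toStr j := by
  intro f
  induction f with
  | zero =>
    intro s ⟨j, h1, h2, h3⟩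
    have : j = s := by omega
    subst this
    exact ⟨j, le_refl _, h3, fun i h1 h2 => (by omega : False).elim, rfl⟩
  | succ f ih =>
    intro s ⟨j, h1, h2, h3⟩
    by_cases hmem : (d ++ "-" ++ PySem.Int.toStr s) ∈ ex
    · have hjs : j ≠ s := fun h => h3 (h ▸ hmem)
      obtain ⟨j', hj1, hj2, hj3, hj4⟩ := ih (s + 1) ⟨j, by omega, by omega, h3⟩
      refine ⟨j', by omega, hj2, ?_, ?_⟩
      · intro i hi1 hi2
        by_cases his : i = s
        · exact his ▸ hmem
        · exact hj3 i (by omega) hi2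
      · simp only [pvLoopA, if_pos hmem]
        exact hj4
    · exact ⟨s, le_refl _, hmem, fun i h1 h2 => (by omega : False).elim,
        by simp only [pvLoopA, if_neg hmem]⟩

theorem pvAltB_char (d : String) (ex : List String) (hmem : d ∈ ex) :
    ∃ j : Int, 2 ≤ j ∧ j < (ex.length : Int) + 3 ∧ (d ++ "-" ++ PySem.Int.toStr j) ∉ ex ∧
      (∀ i : Int, 2 ≤ i → i < j → (d ++ "-" ++ PySem.Int.toStr i) ∈ ex) ∧
      resolve_naming_conflict_py_alt d ex = d ++ "-" ++ PySem.Int.toStr j := by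
  have hnd : (pvUsed d ex).Nodup := by unfold pvUsed; exact PySem.Set.nodup_ofList _
  have hmle : (pvUsed d ex).length ≤ ex.length := by
    unfold pvUsed
    calc (PySem.Set.ofList ((ex.filter
          (fun n => PySem.Str.startswith n (d ++ "-"))).map (fun n => pvRest (d ++ "-") n))).length
        ≤ ((ex.filter (fun n => PySem.Str.startswith n (d ++ "-"))).map
            (fun n => pvRest (d ++ "-") n)).length := PySem.Set.length_ofList_le _
      _ = (ex.filter (fun n => PySem.Str.startswith n (d ++ "-"))).length := List.length_map ..
      _ ≤ ex.length := List.length_filter_le _ _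
  obtain ⟨j0, hj0a, hj0b, hj0c⟩ := pvPigeon (pvUsed d ex) hnd 2 PySem.Int.toStr
    (fun x y hx hy h => pvToStr_inj x y (by omega) (by omega) h)
  have hj0cf : PySem.Set.contains (pvUsed d ex) (PySem.Int.toStr j0) = false := by
    rw [← Bool.not_eq_true, PySem.Set.contains_iff]
    exact hj0c
  have hj0C : j0 ∈ (PySem.List.pyRange 2 ((pvUsed d ex).length + 3) 1).filter
      (fun k => !(PySem.Set.contains (pvUsed d ex) (PySem.Int.toStr k))) := by
    rw [List.mem_filter, PySem.List.mem_pyRange_one]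
    refine ⟨⟨hj0a, by omega⟩, by rw [hj0cf]; rfl⟩
  cases hmin : PySem.List.min? ((PySem.List.pyRange 2 ((pvUsed d ex).length + 3) 1).filter
      (fun k => !(PySem.Set.contains (pvUsed d ex) (PySem.Int.toStr k)))) (fun x => x) with
  | none =>
    rw [PySem.List.min?_eq_none_iff] at hmin
    rw [hmin] at hj0C
    exact absurd hj0C (List.not_mem_nil)
  | some r =>
    have hrC := PySem.List.min?_mem hmin
    rw [List.mem_filter, PySem.List.mem_pyRange_one] at hrC
    obtain ⟨⟨hr2, hrlt⟩, hrb⟩ := hrC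
    have hrnot : PySem.Int.toStr r ∉ pvUsed d ex := by
      intro hin
      rw [← PySem.Set.contains_iff (pvUsed d ex) (PySem.Int.toStr r)] at hin
      rw [hin] at hrb
      exact Bool.false_ne_true (by simpa using hrb)
    refine ⟨r, hr2, by omega, ?_, ?_, ?_⟩
    · intro hin
      exact hrnot ((pvMem_used d ex (PySem.Int.toStr r)).mpr hin)
    · intro i hi1 hi2
      by_contra hni
      have hiU : PySem.Int.toStr i ∉ pvUsed d ex := fun h => hni ((pvMem_used d ex _).mp h)
      have hiC : i ∈ (PySem.List.pyRange 2 ((pvUsed d ex).length + 3) 1).filter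
          (fun k => !(PySem.Set.contains (pvUsed d ex) (PySem.Int.toStr k))) := by
        rw [List.mem_filter, PySem.List.mem_pyRange_one]
        refine ⟨⟨hi1, by omega⟩, ?_⟩
        have : PySem.Set.contains (pvUsed d ex) (PySem.Int.toStr i) = false := by
          rw [← Bool.not_eq_true, PySem.Set.contains_iff]; exact hiU
        rw [this]; rfl
      have := PySem.List.min?_isMin hmin i hiC
      simp only at this
      omega
    · unfold resolve_naming_conflict_py_alt
      rw [if_neg (not_not_intro hmem)]
      show (match PySem.List.min? ((PySem.List.pyRange 2 ((pvUsed d ex).length + 3) 1).filter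
          (fun k => !(PySem.Set.contains (pvUsed d ex) (PySem.Int.toStr k)))) (fun x => x) with
        | some k => d ++ "-" ++ PySem.Int.toStr k
        | none => d) = d ++ "-" ++ PySem.Int.toStr r
      rw [hmin]

-- ===== VERDICT (by name: the statement is the Claim_ definition above) =====
theorem resolve_naming_conflict_py_spec : Claim_equal_resolve_naming_conflict_py := by
  intro d ex _
  unfold Spec_resolve_naming_conflict_py
  by_cases hmem : d ∈ ex
  · obtain ⟨jB, hB1, hBlt, hB2, hB3, hB4⟩ := pvAltB_char d ex hmem
    obtain ⟨jA, hA1, hA2, hA3, hA4⟩ := pvLoopA_char d ex (ex.length + 1) 2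
      ⟨jB, hB1, by push_cast; omega, hB2⟩
    have hAB : jA = jB := by
      rcases lt_trichotomy jA jB with h | h | h
      · exact absurd (hB3 jA hA1 h) hA2
      · exact h
      · exact absurd (hA3 jB hB1 h) hB2
    unfold resolve_naming_conflict_py
    rw [if_neg (not_not_intro hmem), hA4, hB4, hAB]
  · unfold resolve_naming_conflict_py resolve_naming_conflict_py_alt
    rw [if_pos hmem, if_pos hmem]
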